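-- pv_equiv track=rewrite | github.com/Green0v0/TIL | Prgrms/Prgrms-ct-py4/1주차 모의고사/2번.py | resolution
-- ===== SOURCE A (Python) =====
-- import heapq
-- import heapq
--
-- def resolution(n, works):
--     if sum(works) <= n:
--         return 0
--
--     heap = []
--     for value in works:
--         heapq.heappush(heap, -value)
--
--     for _ in range(n):
--         pop = heapq.heappop(heap)
--         heapq.heappush(heap, pop + 1)
--
--     return sum([x**2 for x in heap])
-- ===== SOURCE B (Python) =====
-- def resolution(n, works):
--     total = sum(works)
--     if total <= n:
--         return 0
--     if n <= 0:
--         return sum(v * v for v in works)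
--     m = len(works)
--     if n >= total - m * min(works):
--         # enough budget to flatten everything: final values are q and q+1
--         q, r = divmod(total - n, m)
--         return r * (q + 1) ** 2 + (m - r) * q ** 2
--     ws = sorted(works, reverse=True)
--     level = ws[0]
--     c = 1
--     rem = n
--     idx = 1
--     while idx < len(ws) and rem >= c * (level - ws[idx]):
--         rem -= c * (level - ws[idx])
--         level = ws[idx]
--         c += 1
--         idx += 1
--     d, r = divmod(rem, c)
--     L = level - d
--     return r * (L - 1) ** 2 + (c - r) * L ** 2 + sum(x * x for x in ws[idx:])
-- ===== Notes on version B (the rewrite author's own statement) =====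
-- stated objective: alternative
-- what changed: A simulates n single decrements of the current maximum with a heap; B computes the final leveled multiset directly: if n can flatten everything it uses a divmod closed form from sum/len/min, otherwise it sorts once and water-fills the descending list, so the n-iteration loop disappears.
import Mathlib
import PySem

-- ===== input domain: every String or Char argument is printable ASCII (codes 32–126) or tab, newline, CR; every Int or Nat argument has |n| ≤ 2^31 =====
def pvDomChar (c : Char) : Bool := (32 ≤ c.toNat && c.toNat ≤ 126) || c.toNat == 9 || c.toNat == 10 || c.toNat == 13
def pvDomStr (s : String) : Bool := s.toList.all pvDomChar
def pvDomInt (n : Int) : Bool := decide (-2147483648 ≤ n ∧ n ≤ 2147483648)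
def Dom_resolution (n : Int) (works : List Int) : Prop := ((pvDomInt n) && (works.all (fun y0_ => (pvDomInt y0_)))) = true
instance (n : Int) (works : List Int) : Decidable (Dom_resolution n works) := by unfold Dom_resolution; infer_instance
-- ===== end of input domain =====

-- B replaces A's n-step heap simulation (pop max, decrement, push, n times) by a flat-fill
-- closed form or one sort plus a water-fill scan computing the final leveled multiset directly
-- (objective: alternative algorithm; the equivalence proved below is exact on all inputs).

-- ===== PORT A =====
-- The heapq heap of ints is modelled by its contents: heappush appends, heappop removes the
-- first occurrence of the minimum value (the value heappop returns); the returned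
-- sum of squares does not depend on the heap's internal arrangement, so this is exact.
def heapStep (h : List Int) : List Int :=
  match PySem.List.min? h (fun x => x) with
  | none => h                      -- unreachable: heappop runs only while the heap is nonempty
  | some m => (h.erase m) ++ [m + 1]

def resolution (n : Int) (works : List Int) : Int :=
  if works.sum ≤ n then 0
  else
    (((List.range n.toNat).foldl (fun h _ => heapStep h)
        (works.foldl (fun h v => h ++ [-v]) [])).map (fun x => x ^ 2)).sum

-- ===== PORT B =====
def sumsqB (xs : List Int) : Int := (xs.map (fun x => x * x)).sum

-- after the scan stops: d, r = divmod(rem, c); final level L; leveled part + untouched suffix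
def fillDone (level c rem : Int) (rest : List Int) : Int :=
  let d := PySem.Int.floordiv rem c
  let r := PySem.Int.mod rem c
  let L := level - d
  r * (L - 1) ^ 2 + (c - r) * L ^ 2 + sumsqB rest

-- the while loop of Source B: walk the descending sorted list, merging levels while affordable
def fillB : Int → Int → Int → List Int → Int
  | level, c, rem, [] => fillDone level c rem []
  | level, c, rem, v :: tl =>
    if c * (level - v) ≤ rem then fillB v (c + 1) (rem - c * (level - v)) tl
    else fillDone level c rem (v :: tl)

def resolution_alt (n : Int) (works : List Int) : Int :=
  if works.sum ≤ n then 0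
  else if n ≤ 0 then sumsqB works
  else
    match PySem.List.min? works (fun x => x) with
    | none => 0                    -- unreachable: works ≠ [] since sum works > n > 0
    | some mn =>
      if works.sum - (works.length : Int) * mn ≤ n then
        -- enough budget to flatten everything: final values are q and q+1
        let q := PySem.Int.floordiv (works.sum - n) (works.length : Int)
        let r := PySem.Int.mod (works.sum - n) (works.length : Int)
        r * (q + 1) ^ 2 + ((works.length : Int) - r) * q ^ 2
      else
        match PySem.List.sorted works (fun x => x) true with
        | [] => 0                  -- unreachable likewise
        | w :: tl => fillB w 1 n tl

-- ===== PRECONDITION & SPEC =====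
def Spec_resolution (n : Int) (works : List Int) (out : Int) : Prop := out = resolution_alt n works
instance (n : Int) (works : List Int) (out : Int) : Decidable (Spec_resolution n works out) := by unfold Spec_resolution; infer_instance

-- ===== CLAIM (what is proved, stated in full; the proofs are below) =====
def Claim_equal_resolution : Prop := ∀ (n : Int) (works : List Int), Dom_resolution n works → Spec_resolution n works (resolution n works)

-- ===== LEMMAS AND PROOFS =====

-- proof-side vocabulary (heap world: h = the negated work list, a step raises one minimum by 1)
-- fInt L h = cost of raising every element of h up to L
def fInt (L : Int) (h : List Int) : Int := (h.map (fun x => max (L - x) 0)).sum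
-- cntP L h = how many elements of h are ≤ L
def cntP (L : Int) (h : List Int) : Nat := h.countP (fun x => decide (x ≤ L))
-- gtf L h = the elements of h strictly above L
def gtf (L : Int) (h : List Int) : List Int := h.filter (fun x => decide (L < x))
-- canonical multiset after k raising steps, for the (L, r) with k = fInt L h + r, r < cntP L h
def canon (L : Int) (r : Nat) (h : List Int) : List Int :=
  List.replicate (cntP L h - r) L ++ List.replicate r (L + 1) ++ gtf L h
-- works-world vocabulary for the B side (capping world)
def gW (B : Int) (l : List Int) : Int := (l.map (fun v => max (v - B) 0)).sum
def cwW (B : Int) (l : List Int) : Nat := l.countP (fun v => decide (B ≤ v))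

lemma sumsqB_perm {l₁ l₂ : List Int} (hp : l₁.Perm l₂) : sumsqB l₁ = sumsqB l₂ := by
  unfold sumsqB; exact (hp.map _).sum_eq

lemma foldl_range_iterate {α : Type} (f : α → α) (k : Nat) (x : α) :
    (List.range k).foldl (fun h _ => f h) x = f^[k] x := by
  induction k generalizing x with
  | zero => rfl
  | succ k ih => rw [List.range_succ, List.foldl_append, ih, Function.iterate_succ_apply']; rfl

lemma heapStep_perm {h h' : List Int} (hp : h.Perm h') : (heapStep h).Perm (heapStep h') := by
  unfold heapStep
  cases hm : PySem.List.min? h (fun x => x) with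
  | none =>
    rw [PySem.List.min?_eq_none_iff] at hm
    subst hm
    have : h' = [] := hp.nil_eq.symm
    subst this; simp [PySem.List.min?]
  | some m =>
    cases hm' : PySem.List.min? h' (fun x => x) with
    | none =>
      rw [PySem.List.min?_eq_none_iff] at hm'
      subst hm'
      exact absurd hp.eq_nil (by intro hh; rw [hh] at hm; simp [PySem.List.min?] at hm)
    | some m' =>
      have hmem := PySem.List.min?_mem hm
      have hmem' := PySem.List.min?_mem hm'
      have h1 := PySem.List.min?_isMin hm m' (hp.mem_iff.mpr hmem')
      have h2 := PySem.List.min?_isMin hm' m (hp.mem_iff.mp hmem)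
      have : m = m' := le_antisymm h1 h2
      subst this
      exact (hp.erase m).append (List.Perm.refl _)

lemma canon_cons {L : Int} {r : Nat} {h : List Int} (hr : r < cntP L h) :
    canon L r h = L :: (List.replicate (cntP L h - r - 1) L ++ List.replicate r (L + 1) ++ gtf L h) := by
  unfold canon
  have : cntP L h - r = (cntP L h - r - 1) + 1 := by omega
  rw [this, List.replicate_succ]; simp

lemma canon_min {L : Int} {r : Nat} {h : List Int} (hr : r < cntP L h) :
    PySem.List.min? (canon L r h) (fun x => x) = some L := by
  cases hm : PySem.List.min? (canon L r h) (fun x => x) with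
  | none => rw [PySem.List.min?_eq_none_iff, canon_cons hr] at hm; simp at hm
  | some m =>
    have hmem := PySem.List.min?_mem hm
    have hle : L ≤ m := by
      rw [canon_cons hr, List.mem_cons] at hmem
      rcases hmem with h1 | h1
      · omega
      · rcases List.mem_append.mp h1 with h2 | h2
        · rcases List.mem_append.mp h2 with h3 | h3
          · have := List.eq_of_mem_replicate h3; omega
          · have := List.eq_of_mem_replicate h3; omega
        · have := List.of_mem_filter h2; simp at this; omega
    have hge : m ≤ L := PySem.List.min?_isMin hm L (by rw [canon_cons hr]; exact List.mem_cons_self)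
    have : m = L := le_antisymm hge hle
    rw [this]

lemma f_succ (L : Int) (h : List Int) : fInt (L + 1) h = fInt L h + cntP L h := by
  induction h with
  | nil => simp [fInt, cntP]
  | cons x t ih =>
    simp only [fInt, cntP, List.map_cons, List.sum_cons, List.countP_cons] at *
    by_cases hx : x ≤ L <;> simp [hx] <;> omega

lemma f_mono {L L' : Int} (hLL : L ≤ L') (h : List Int) : fInt L h ≤ fInt L' h := by
  induction h with
  | nil => simp [fInt]
  | cons x t ih =>
    simp only [fInt, List.map_cons, List.sum_cons] at *
    have : max (L - x) 0 ≤ max (L' - x) 0 := by omega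
    omega

lemma cntP_mono {L L' : Int} (hLL : L ≤ L') (h : List Int) : cntP L h ≤ cntP L' h := by
  apply List.countP_mono_left
  intro x _ hx
  simp only [decide_eq_true_eq] at *; omega

lemma filter_le_min {m : Int} {h : List Int} (hmin : ∀ x ∈ h, m ≤ x) :
    h.filter (fun x => decide (x ≤ m)) = List.replicate (cntP m h) m := by
  rw [List.eq_replicate_iff]
  constructor
  · rw [cntP, ← List.countP_eq_length_filter]
  · intro b hb
    have h1 := List.of_mem_filter hb
    have h2 := hmin b (List.mem_of_mem_filter hb)
    simp at h1; omega

lemma canon_base_perm {m : Int} {h : List Int} (hmin : ∀ x ∈ h, m ≤ x) :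
    (canon m 0 h).Perm h := by
  unfold canon gtf
  rw [Nat.sub_zero, List.replicate_zero, ← filter_le_min hmin]
  have : h.filter (fun x => decide (m < x)) = h.filter (fun x => !decide (x ≤ m)) := by
    apply List.filter_congr; intro x _
    simp only [← decide_not, decide_eq_decide]; omega
  rw [this]
  simpa using List.filter_append_perm (fun x => decide (x ≤ m)) h

lemma cntP_succ (L : Int) (h : List Int) :
    cntP (L + 1) h = cntP L h + (gtf L h).countP (fun x => decide (x ≤ L + 1)) := by
  induction h with
  | nil => simp [cntP, gtf]
  | cons x t ih =>
    simp only [cntP, gtf, List.countP_cons, List.filter_cons] at *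
    by_cases h1 : x ≤ L
    · have h2 : x ≤ L + 1 := by omega
      have h3 : ¬ (L < x) := by omega
      simp [h1, h2, h3, ih]; omega
    · by_cases h2 : x ≤ L + 1
      · have h3 : L < x := by omega
        simp [h1, h2, h3, ih]; omega
      · have h3 : L < x := by omega
        simp [h1, h2, h3, ih]

lemma gtf_succ (L : Int) (h : List Int) :
    gtf (L + 1) h = (gtf L h).filter (fun x => decide (L + 1 < x)) := by
  unfold gtf
  rw [List.filter_filter]
  apply List.filter_congr; intro x _; simp; omega

lemma gtf_split_perm (L : Int) (h : List Int) :
    (gtf L h).Perm (List.replicate ((gtf L h).countP (fun x => decide (x ≤ L + 1))) (L + 1) ++ gtf (L + 1) h) := by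
  have hsplit := List.filter_append_perm (fun x => decide (x ≤ L + 1)) (gtf L h)
  have h1 : (gtf L h).filter (fun x => decide (x ≤ L + 1)) =
      List.replicate ((gtf L h).countP (fun x => decide (x ≤ L + 1))) (L + 1) := by
    rw [List.eq_replicate_iff]
    constructor
    · rw [← List.countP_eq_length_filter]
    · intro b hb
      have hb1 := List.of_mem_filter hb
      have hb2 := List.of_mem_filter (List.mem_of_mem_filter hb)
      simp at hb1 hb2; omega
  have h2 : (gtf L h).filter (fun x => !decide (x ≤ L + 1)) = gtf (L + 1) h := by
    rw [gtf_succ]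
    apply List.filter_congr; intro x _
    simp only [← decide_not, decide_eq_decide]; omega
  rw [h1, h2] at hsplit
  exact hsplit.symm

lemma perm_move (A B C : List Int) (x : Int) :
    (A ++ B ++ C ++ [x]).Perm (A ++ (B ++ [x]) ++ C) := by
  simp only [List.append_assoc]
  refine List.Perm.append_left A (List.Perm.append_left B ?_)
  simp only [List.singleton_append]
  exact List.perm_append_singleton x C

lemma steps_char (h0 : List Int) (hne : h0 ≠ []) (k : Nat) :
    ∃ (L : Int) (r : Nat), (k : Int) = fInt L h0 + r ∧ (r : Int) < cntP L h0 ∧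
      (heapStep^[k] h0).Perm (canon L r h0) := by
  induction k with
  | zero =>
    cases hm : PySem.List.min? h0 (fun x => x) with
    | none => exact absurd ((PySem.List.min?_eq_none_iff h0 _).mp hm) hne
    | some m =>
      refine ⟨m, 0, ?_, ?_, ?_⟩
      · have : fInt m h0 = 0 := by
          apply List.sum_eq_zero
          intro x hx
          obtain ⟨y, hy, rfl⟩ := List.mem_map.mp hx
          have := PySem.List.min?_isMin hm y hy
          omega
        simp [this]
      · have : 0 < cntP m h0 := by
          apply List.countP_pos_iff.mpr
          exact ⟨m, PySem.List.min?_mem hm, by simp⟩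
        exact_mod_cast this
      · exact (canon_base_perm (PySem.List.min?_isMin hm)).symm
  | succ k ih =>
    obtain ⟨L, r, hk, hr, hperm⟩ := ih
    have hrn : r < cntP L h0 := by exact_mod_cast hr
    rw [Function.iterate_succ_apply']
    have hstep := heapStep_perm hperm
    have hcomp : heapStep (canon L r h0) =
        (List.replicate (cntP L h0 - r - 1) L ++ List.replicate r (L + 1) ++ gtf L h0) ++ [L + 1] := by
      unfold heapStep
      rw [canon_min hrn]
      show ((canon L r h0).erase L) ++ [L + 1] = _
      rw [canon_cons hrn, List.erase_cons_head]
    rw [hcomp] at hstep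
    by_cases hcase : r + 1 < cntP L h0
    · refine ⟨L, r + 1, ?_, ?_, ?_⟩
      · push_cast; omega
      · exact_mod_cast hcase
      · refine hstep.trans ?_
        unfold canon
        have ha : cntP L h0 - (r + 1) = cntP L h0 - r - 1 := by omega
        rw [ha, List.replicate_succ']
        exact perm_move _ _ _ _
    · have heq : r + 1 = cntP L h0 := by omega
      refine ⟨L + 1, 0, ?_, ?_, ?_⟩
      · rw [f_succ]; push_cast; omega
      · have h1 : 0 < cntP L h0 := by omega
        have h2 := cntP_mono (by omega : L ≤ L + 1) h0
        have : 0 < cntP (L + 1) h0 := by omega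
        exact_mod_cast this
      · refine hstep.trans ?_
        have ha : cntP L h0 - r - 1 = 0 := by omega
        rw [ha, List.replicate_zero, List.nil_append]
        have p1 : ((List.replicate r (L + 1) ++ gtf L h0) ++ [L + 1]).Perm
            (List.replicate (r + 1) (L + 1) ++ gtf L h0) := by
          rw [List.replicate_succ']
          exact perm_move [] _ _ _
        refine p1.trans ?_
        rw [heq]
        unfold canon
        rw [Nat.sub_zero, List.replicate_zero, List.append_nil]
        have hmid := (gtf_split_perm L h0).append_left (List.replicate (cntP L h0) (L + 1))
        refine hmid.trans ?_
        rw [← List.append_assoc, ← List.replicate_add, ← cntP_succ]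

lemma char_unique {k : Int} {h : List Int} {L : Int} {r : Nat} {L' : Int} {r' : Nat}
    (h1 : k = fInt L h + r) (h2 : (r : Int) < cntP L h)
    (h1' : k = fInt L' h + r') (h2' : (r' : Int) < cntP L' h) : L = L' ∧ r = r' := by
  have key : ∀ (M M' : Int) (s s' : Nat), k = fInt M h + s → (s : Int) < cntP M h →
      k = fInt M' h + s' → (s' : Int) < cntP M' h → M ≤ M' := by
    intro M M' s s' e1 e2 e1' e2'
    by_contra hlt
    have hm : M' + 1 ≤ M := by omega
    have := f_mono hm h
    rw [f_succ] at this
    omega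
  have hLL' := key L L' r r' h1 h2 h1' h2'
  have hL'L := key L' L r' r h1' h2' h1 h2
  have hL : L = L' := le_antisymm hLL' hL'L
  subst hL
  exact ⟨rfl, by omega⟩

lemma fillDone_eq (level c rem : Int) (rest : List Int) :
    fillDone level c rem rest =
      PySem.Int.mod rem c * (level - PySem.Int.floordiv rem c - 1) ^ 2 +
        (c - PySem.Int.mod rem c) * (level - PySem.Int.floordiv rem c) ^ 2 + sumsqB rest := rfl

lemma gW_of_le {B : Int} {l : List Int} (hall : ∀ x ∈ l, B ≤ x) :
    gW B l = l.sum - l.length * B := by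
  induction l with
  | nil => simp [gW]
  | cons x t ih =>
    have hx := hall x List.mem_cons_self
    have ht := ih (fun y hy => hall y (List.mem_cons_of_mem x hy))
    simp only [gW, List.map_cons, List.sum_cons, List.length_cons, List.sum_cons] at *
    push_cast
    have : ((t.length : Int) + 1) * B = (t.length : Int) * B + B := by ring
    omega

lemma gW_zero_of_le {B : Int} {l : List Int} (hall : ∀ x ∈ l, x ≤ B) : gW B l = 0 := by
  apply List.sum_eq_zero
  intro x hx
  obtain ⟨y, hy, rfl⟩ := List.mem_map.mp hx
  have := hall y hy
  omega

lemma cwW_of_le {B : Int} {l : List Int} (hall : ∀ x ∈ l, B ≤ x) : cwW B l = l.length := by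
  unfold cwW
  apply List.countP_eq_length.mpr
  intro x hx
  simpa using hall x hx

lemma cwW_zero_of_lt {B : Int} {l : List Int} (hall : ∀ x ∈ l, x < B) : cwW B l = 0 := by
  unfold cwW
  apply List.countP_eq_zero.mpr
  intro x hx
  simp only [decide_eq_true_eq]
  intro hc
  exact absurd (hall x hx) (by omega)

lemma filter_lt_nil {B : Int} {l : List Int} (hall : ∀ x ∈ l, B ≤ x) :
    l.filter (fun v => decide (v < B)) = [] := by
  apply List.filter_eq_nil_iff.mpr
  intro x hx
  have := hall x hx
  simp; omega

lemma filter_lt_all {B : Int} {l : List Int} (hall : ∀ x ∈ l, x < B) :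
    l.filter (fun v => decide (v < B)) = l := by
  apply List.filter_eq_self.mpr
  intro x hx
  simpa using hall x hx

lemma gW_append (B : Int) (l₁ l₂ : List Int) : gW B (l₁ ++ l₂) = gW B l₁ + gW B l₂ := by
  simp [gW]

lemma cwW_append (B : Int) (l₁ l₂ : List Int) : cwW B (l₁ ++ l₂) = cwW B l₁ + cwW B l₂ := by
  simp [cwW]

lemma fillB_spec (k : Int) :
    ∀ (rest done : List Int) (level c rem : Int),
      done ≠ [] → (c : Int) = done.length → (∀ x ∈ done, level ≤ x) →
      rest.Pairwise (fun a b => b ≤ a) → (∀ x ∈ rest, x ≤ level) →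
      0 ≤ rem → rem = k - (done.sum - c * level) →
      ∃ (B : Int) (r : Nat),
        k = gW B (done ++ rest) + r ∧ (r : Int) < cwW B (done ++ rest) ∧
        fillB level c rem rest =
          (r : Int) * (B - 1) ^ 2 + ((cwW B (done ++ rest) : Int) - r) * B ^ 2 +
            sumsqB ((done ++ rest).filter (fun v => decide (v < B))) := by
  intro rest
  induction rest with
  | nil =>
    intro done level c rem hne hc hdone _ _ hrem0 hrem
    have hcpos : 0 < c := by
      rw [hc]
      have : done.length ≠ 0 := fun hz => hne (List.length_eq_zero_iff.mp hz)
      omega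
    set d := PySem.Int.floordiv rem c with hd
    set r := PySem.Int.mod rem c with hr
    have hdc : d * c + r = rem := PySem.Int.floordiv_mul_add_mod rem c
    have hr0 : 0 ≤ r := PySem.Int.mod_nonneg rem hcpos
    have hrc : r < c := PySem.Int.mod_lt rem hcpos
    have hd0 : 0 ≤ d := by nlinarith
    set B := level - d with hB
    have hBle : ∀ x ∈ done, B ≤ x := fun x hx => by
      have := hdone x hx; omega
    refine ⟨B, r.toNat, ?_, ?_, ?_⟩
    · rw [List.append_nil, gW_of_le hBle, ← hc]
      rw [Int.toNat_of_nonneg hr0]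
      have h2 : c * d = d * c := mul_comm c d
      have : c * B = c * level - c * d := by ring
      omega
    · rw [List.append_nil, cwW_of_le hBle, ← hc]
      rw [Int.toNat_of_nonneg hr0]
      omega
    · show fillDone level c rem [] = _
      rw [fillDone_eq, ← hd, ← hr,
          List.append_nil, cwW_of_le hBle, ← hc, Int.toNat_of_nonneg hr0,
          filter_lt_nil hBle, hB]
  | cons v tl ih =>
    intro done level c rem hne hc hdone hpair hle hrem0 hrem
    have hcpos : 0 < c := by
      rw [hc]
      have : done.length ≠ 0 := fun hz => hne (List.length_eq_zero_iff.mp hz)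
      omega
    have hvlev : v ≤ level := hle v List.mem_cons_self
    by_cases hif : c * (level - v) ≤ rem
    · -- continue the scan
      have hstep : fillB level c rem (v :: tl) = fillB v (c + 1) (rem - c * (level - v)) tl := by
        simp only [fillB]; rw [if_pos hif]
      obtain ⟨B, r, e1, e2, e3⟩ := ih (done ++ [v]) v (c + 1) (rem - c * (level - v))
        (by simp) (by simp only [List.length_append, List.length_cons, List.length_nil]; push_cast; omega)
        (by intro x hx
            rcases List.mem_append.mp hx with h1 | h1
            · exact le_trans hvlev (hdone x h1)
            · simp at h1; omega)
        (List.Pairwise.sublist (List.sublist_cons_self v tl) hpair)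
        (by intro x hx
            exact (List.pairwise_cons.mp hpair).1 x hx)
        (by omega)
        (by rw [hrem]; simp [List.sum_append]; ring)
      refine ⟨B, r, ?_, ?_, ?_⟩
      · rwa [List.append_assoc] at e1
      · rwa [List.append_assoc] at e2
      · rw [hstep, e3, List.append_assoc]
        rfl
    · -- stop here
      rw [not_le] at hif
      have hstop : fillB level c rem (v :: tl) = fillDone level c rem (v :: tl) := by
        simp only [fillB]; rw [if_neg (by omega)]
      set d := PySem.Int.floordiv rem c with hd
      set r := PySem.Int.mod rem c with hr
      have hdc : d * c + r = rem := PySem.Int.floordiv_mul_add_mod rem c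
      have hr0 : 0 ≤ r := PySem.Int.mod_nonneg rem hcpos
      have hrc : r < c := PySem.Int.mod_lt rem hcpos
      have hd0 : 0 ≤ d := by nlinarith
      set B := level - d with hB
      have hdlt : d < level - v := by nlinarith
      have hvB : v < B := by omega
      have hBle : ∀ x ∈ done, B ≤ x := fun x hx => by
        have := hdone x hx; omega
      have hrestlt : ∀ x ∈ v :: tl, x < B := by
        intro x hx
        rcases List.mem_cons.mp hx with rfl | h1
        · exact hvB
        · have := (List.pairwise_cons.mp hpair).1 x h1
          omega
      refine ⟨B, r.toNat, ?_, ?_, ?_⟩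
      · rw [gW_append, gW_of_le hBle, gW_zero_of_le (fun x hx => le_of_lt (hrestlt x hx)), ← hc]
        rw [Int.toNat_of_nonneg hr0]
        have h2 : c * d = d * c := mul_comm c d
        have : c * B = c * level - c * d := by ring
        omega
      · rw [cwW_append, cwW_of_le hBle, cwW_zero_of_lt hrestlt]
        omega
      · rw [hstop, fillDone_eq, ← hd, ← hr]
        rw [cwW_append, cwW_of_le hBle, cwW_zero_of_lt hrestlt, Int.toNat_of_nonneg hr0]
        rw [List.filter_append, filter_lt_nil hBle, filter_lt_all hrestlt, List.nil_append]
        have hlen : ((done.length + 0 : Nat) : Int) = c := by omega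
        rw [hlen, hB]

-- bridges between the two worlds (the heap holds works.map (-·))
lemma g_neg (B : Int) (l : List Int) : fInt (-B) (l.map (fun v => -v)) = gW B l := by
  unfold fInt gW; rw [List.map_map]
  congr 1; apply List.map_congr_left; intro x _; simp only [Function.comp]; omega

lemma cw_neg (B : Int) (l : List Int) : cntP (-B) (l.map (fun v => -v)) = cwW B l := by
  unfold cntP cwW; rw [List.countP_map]
  apply List.countP_congr; intro x _
  simp only [Function.comp, decide_eq_true_eq]
  omega

lemma gtf_neg (B : Int) (l : List Int) :
    gtf (-B) (l.map (fun v => -v)) = (l.filter (fun v => decide (v < B))).map (fun v => -v) := by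
  unfold gtf; rw [List.filter_map]
  congr 1; apply List.filter_congr; intro x _
  simp only [Function.comp, decide_eq_decide]
  omega

lemma sumsqB_neg (l : List Int) : sumsqB (l.map (fun v => -v)) = sumsqB l := by
  unfold sumsqB; rw [List.map_map]
  congr 1; apply List.map_congr_left; intro x _; simp only [Function.comp]; ring

lemma sq_canon (L : Int) (r : Nat) (h : List Int) (hr : r ≤ cntP L h) :
    sumsqB (canon L r h) =
      (r : Int) * (L + 1) ^ 2 + ((cntP L h : Int) - r) * L ^ 2 + sumsqB (gtf L h) := by
  unfold canon sumsqB
  simp only [List.map_append, List.sum_append, List.map_replicate, List.sum_replicate, nsmul_eq_mul]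
  push_cast [Nat.cast_sub hr]
  ring

lemma pow_two_sum (l : List Int) : (l.map (fun x => x ^ 2)).sum = sumsqB l := by
  unfold sumsqB; congr 1; apply List.map_congr_left; intro x _; ring

-- ===== VERDICT (by name: the statement is the Claim_ definition above) =====
theorem resolution_spec : Claim_equal_resolution := by
  unfold Claim_equal_resolution Spec_resolution
  intro n works _
  unfold resolution resolution_alt
  by_cases hs : works.sum ≤ n
  · rw [if_pos hs, if_pos hs]
  · rw [if_neg hs, if_neg hs]
    have hheap : works.foldl (fun h v => h ++ [-v]) [] = works.map (fun v => -v) := by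
      simpa using PySem.List.foldl_append_singleton_eq_map (fun v => -v) works []
    rw [hheap, foldl_range_iterate]
    by_cases hn : n ≤ 0
    · rw [if_pos hn]
      have h0 : n.toNat = 0 := Int.toNat_of_nonpos hn
      rw [h0, Function.iterate_zero, id_eq, pow_two_sum, sumsqB_neg]
    · rw [if_neg hn]
      have hn1 : 1 ≤ n := by omega
      have hwne : works ≠ [] := by
        intro he; rw [he] at hs; simp at hs; omega
      have hne0 : works.map (fun v => -v) ≠ [] := by
        simpa using hwne
      -- A side: the k-step heap is the canonical leveled multiset
      obtain ⟨L, r, hkA, hrA, hpermA⟩ := steps_char (works.map (fun v => -v)) hne0 n.toNat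
      rw [pow_two_sum, sumsqB_perm hpermA,
          sq_canon L r _ (le_of_lt (by exact_mod_cast hrA))]
      have hM0 : 0 < (works.length : Int) := by
        have := List.length_pos_iff.mpr hwne
        exact_mod_cast this
      obtain ⟨mn, hmin⟩ : ∃ mn, PySem.List.min? works (fun x => x) = some mn := by
        cases hmm : PySem.List.min? works (fun x => x) with
        | none => exact absurd ((PySem.List.min?_eq_none_iff works _).mp hmm) hwne
        | some x => exact ⟨x, rfl⟩
      have hmn : ∀ v ∈ works, mn ≤ v := PySem.List.min?_isMin hmin
      simp only [hmin]
      by_cases hfast : works.sum - (works.length : Int) * mn ≤ n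
      · -- flat fast path
        rw [if_pos hfast]
        set M := (works.length : Int) with hMdef
        set s := works.sum - n with hsdef
        set q := PySem.Int.floordiv s M with hq
        set r2 := PySem.Int.mod s M with hr2
        show _ = r2 * (q + 1) ^ 2 + (M - r2) * q ^ 2
        have hqr : q * M + r2 = s := PySem.Int.floordiv_mul_add_mod s M
        have hr20 : 0 ≤ r2 := PySem.Int.mod_nonneg s hM0
        have hr2M : r2 < M := PySem.Int.mod_lt s hM0
        have hsle : s ≤ M * mn := by omega
        by_cases hr0 : r2 = 0
        · -- everything levels exactly to q
          have hqmn : q ≤ mn := by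
            by_contra hcon
            have hle : mn ≤ q - 1 := by omega
            have h1 : M * mn ≤ M * (q - 1) := mul_le_mul_of_nonneg_left hle (le_of_lt hM0)
            have hcm : M * (q - 1) = q * M - M := by ring
            omega
          have hall : ∀ v ∈ works, q ≤ v := fun v hv => le_trans hqmn (hmn v hv)
          have hf : fInt (-q) (works.map (fun v => -v)) = works.sum - M * q := by
            rw [g_neg, gW_of_le hall]
          have he1 : (n.toNat : Int) = fInt (-q) (works.map (fun v => -v)) + ((0 : Nat) : Int) := by
            rw [Int.toNat_of_nonneg (by omega : (0:Int) ≤ n), hf]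
            have hcm : M * q = q * M := mul_comm M q
            omega
          have he2 : ((0 : Nat) : Int) < cntP (-q) (works.map (fun v => -v)) := by
            rw [cw_neg, cwW_of_le hall]
            exact_mod_cast List.length_pos_iff.mpr hwne
          obtain ⟨hLB, hrr⟩ := char_unique hkA hrA he1 he2
          subst hLB; subst hrr
          rw [cw_neg, cwW_of_le hall, gtf_neg, filter_lt_nil hall]
          simp only [List.map_nil, sumsqB, List.sum_nil]
          rw [hr0, ← hMdef]
          ring
        · -- r2 elements end at q+1, the rest at q
          have hqmn : q + 1 ≤ mn := by
            by_contra hcon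
            have hle : mn ≤ q := by omega
            have h1 : M * mn ≤ M * q := mul_le_mul_of_nonneg_left hle (le_of_lt hM0)
            have hcm : M * q = q * M := mul_comm M q
            omega
          have hall : ∀ v ∈ works, q + 1 ≤ v := fun v hv => le_trans hqmn (hmn v hv)
          have hf : fInt (-(q + 1)) (works.map (fun v => -v)) = works.sum - M * (q + 1) := by
            rw [g_neg, gW_of_le hall]
          have hrfc : ((M - r2).toNat : Int) = M - r2 := Int.toNat_of_nonneg (by omega)
          have he1 : (n.toNat : Int) =
              fInt (-(q + 1)) (works.map (fun v => -v)) + ((M - r2).toNat : Int) := by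
            rw [Int.toNat_of_nonneg (by omega : (0:Int) ≤ n), hf, hrfc]
            have hcm : M * (q + 1) = q * M + M := by ring
            omega
          have he2 : ((M - r2).toNat : Int) < cntP (-(q + 1)) (works.map (fun v => -v)) := by
            rw [cw_neg, cwW_of_le hall, hrfc, ← hMdef]
            omega
          obtain ⟨hLB, hrr⟩ := char_unique hkA hrA he1 he2
          subst hLB; subst hrr
          rw [cw_neg, cwW_of_le hall, gtf_neg, filter_lt_nil hall]
          simp only [List.map_nil, sumsqB, List.sum_nil]
          rw [hrfc, ← hMdef]
          ring
      · -- sort + water-fill scan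
        rw [if_neg hfast]
        cases hds : PySem.List.sorted works (fun x => x) true with
        | nil => exact absurd ((PySem.List.sorted_eq_nil_iff works _ true).mp hds) hwne
        | cons w tl =>
        -- B side: the water-fill scan satisfies the same characterization
        have hsort := PySem.List.sorted_pairwise_rev works (fun x => x)
        rw [hds] at hsort
        have hpc := List.pairwise_cons.mp hsort
        obtain ⟨B, r', e1, e2, e3⟩ := fillB_spec n tl [w] w 1 n
          (by simp) (by simp) (by intro x hx; simp at hx; omega)
          hpc.2 hpc.1 (by omega) (by simp)
        have hperm : (w :: tl).Perm works := by
          rw [← hds]; exact PySem.List.sorted_perm works _ true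
        have hgw : gW B ([w] ++ tl) = gW B works := (hperm.map _).sum_eq
        have hcw : cwW B ([w] ++ tl) = cwW B works := hperm.countP_eq _
        have he1 : (n.toNat : Int) = fInt (-B) (works.map (fun v => -v)) + r' := by
          rw [Int.toNat_of_nonneg (by omega : (0:Int) ≤ n), g_neg, ← hgw]
          exact e1
        have he2 : (r' : Int) < cntP (-B) (works.map (fun v => -v)) := by
          rw [cw_neg, ← hcw]
          exact_mod_cast e2
        obtain ⟨hLB, hrr⟩ := char_unique hkA hrA he1 he2
        subst hLB
        subst hrr
        -- align the two closed forms
        show _ = fillB w 1 n tl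
        rw [e3, cw_neg, hcw]
        rw [gtf_neg, sumsqB_neg]
        have hfil : (works.filter (fun v => decide (v < B))).Perm
            (((w :: tl)).filter (fun v => decide (v < B))) := (hperm.filter _).symm
        rw [sumsqB_perm hfil]
        simp only [List.singleton_append]
        ring
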